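-- pv_equiv track=rewrite | github.com/Alexvargame/Python_tasks | pythonist/color_pattern_times.py | color_pattern_time
-- ===== SOURCE A (Python) =====
-- def color_pattern_time(cols):
--     adict={}
--     ch=0
--     for i in range(len(cols)):
--         key, value=cols[i], i
--         l=adict.get(key,[])
--         l.append(value)
--         adict[key]=l
--     for ad in adict:
--         ch+=len(adict[ad])-(adict[ad][-1]-adict[ad][0])
--     return ch+len(cols)*2-1
-- ===== SOURCE B (Python) =====
-- def color_pattern_time(cols):
--     # Telescoping: per-color span last-first equals the sum of gaps between
--     # consecutive occurrences, so subtract each gap online and never store positions.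
--     seen = {}
--     total = 3 * len(cols) - 1
--     for i, c in enumerate(cols):
--         if c in seen:
--             total -= i - seen[c]
--         seen[c] = i
--     return total
-- ===== Notes on version B (the rewrite author's own statement) =====
-- stated objective: alternative
-- what changed: A builds a dict of full per-color position lists and then a second per-color loop summing count-(last-first) plus 2n-1; B never stores positions or spans: a single online pass subtracts the gap to the previous occurrence of the same color from the closed-form 3n-1, using the telescoping identity that a per-color span equals the sum of consecutive-occurrence gaps and that counts sum to n.
import Mathlib
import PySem

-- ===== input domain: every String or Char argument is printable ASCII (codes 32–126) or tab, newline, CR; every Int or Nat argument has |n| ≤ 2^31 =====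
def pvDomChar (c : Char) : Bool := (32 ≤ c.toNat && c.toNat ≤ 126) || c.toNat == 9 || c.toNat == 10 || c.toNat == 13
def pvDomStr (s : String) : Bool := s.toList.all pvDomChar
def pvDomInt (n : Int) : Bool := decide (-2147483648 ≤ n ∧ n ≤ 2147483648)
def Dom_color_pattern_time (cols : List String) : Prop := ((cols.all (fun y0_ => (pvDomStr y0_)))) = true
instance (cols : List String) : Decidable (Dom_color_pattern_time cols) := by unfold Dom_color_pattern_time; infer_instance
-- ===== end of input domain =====

-- B replaces A's dict of full per-color position lists plus a second per-color loop with a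
-- single online pass that subtracts each gap to the previous occurrence of the same color
-- from the closed form 3n-1 (telescoping identity); objective: alternative.

-- ===== PORT A =====
def color_pattern_time (cols : List String) : Int :=
  -- for i in range(len(cols)): l = adict.get(cols[i], []); l.append(i); adict[cols[i]] = l
  let adict : PySem.Dict String (List Int) :=
    (PySem.List.pyRange 0 (PySem.List.len cols)).foldl
      (fun d i =>
        d.insert (PySem.List.pyGetD cols i "") ((d.getD (PySem.List.pyGetD cols i "") []) ++ [i]))
      PySem.Dict.empty
  -- for ad in adict: ch += len(adict[ad]) - (adict[ad][-1] - adict[ad][0])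
  -- (every stored list is nonempty, so the pyGetD defaults are never taken)
  let ch : Int :=
    adict.keys.foldl
      (fun ch ad =>
        ch + ((adict.getD ad []).length : Int)
          - (PySem.List.pyGetD (adict.getD ad []) (-1) 0 - PySem.List.pyGetD (adict.getD ad []) 0 0))
      0
  ch + (cols.length : Int) * 2 - 1

-- ===== PORT B =====
def color_pattern_time_alt (cols : List String) : Int :=
  -- seen = {}; total = 3n-1; for i,c: if c in seen: total -= i - seen[c]; seen[c] = i
  let st : PySem.Dict String Int × Int :=
    (PySem.List.enumerate cols).foldl
      (fun st p =>
        (st.1.insert p.2 p.1,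
         if st.1.contains p.2 then st.2 - (p.1 - st.1.getD p.2 0) else st.2))
      (PySem.Dict.empty, 3 * (cols.length : Int) - 1)
  st.2

-- ===== PRECONDITION & SPEC =====
def Spec_color_pattern_time (cols : List String) (out : Int) : Prop := out = color_pattern_time_alt cols
instance (cols : List String) (out : Int) : Decidable (Spec_color_pattern_time cols out) := by unfold Spec_color_pattern_time; infer_instance

-- ===== CLAIM (what is proved, stated in full; the proofs are below) =====
def Claim_equal_color_pattern_time : Prop := ∀ (cols : List String), Dom_color_pattern_time cols → Spec_color_pattern_time cols (color_pattern_time cols)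

-- ===== LEMMAS AND PROOFS =====

-- sum of per-color spans, measured against A's dict (first = head) and B's seen dict (last)
def pvSpan (d : PySem.Dict String (List Int)) (seen : PySem.Dict String Int) : Int :=
  (d.keys.map (fun k => seen.getD k 0 - (d.getD k []).head?.getD 0)).sum

def pvSumLen (d : PySem.Dict String (List Int)) : Int :=
  (d.keys.map (fun k => ((d.getD k []).length : Int))).sum

-- joint invariant of A's grouping loop and B's (seen, total) loop, for a fixed base
def pvInv (d : PySem.Dict String (List Int)) (seen : PySem.Dict String Int)
    (total base : Int) : Prop :=
  seen.keys = d.keys ∧ d.keys.Nodup ∧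
  (∀ k : String, (d.getD k []).getLast? = seen.get? k) ∧
  total = base - pvSpan d seen

lemma pv_sum_map_update {l : List String} (hn : l.Nodup) {c : String} (hc : c ∈ l)
    (g g' : String → Int) (hg : ∀ k ∈ l, k ≠ c → g' k = g k) :
    (l.map g').sum = (l.map g).sum + (g' c - g c) := by
  induction l with
  | nil => cases hc
  | cons a t ih =>
    rcases List.mem_cons.mp hc with h | h
    · subst h
      have ht : ∀ k ∈ t, g' k = g k := fun k hk =>
        hg k (List.mem_cons_of_mem _ hk) (fun e => (List.nodup_cons.mp hn).1 (e ▸ hk))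
      simp [List.map_congr_left ht]
      ring
    · have ha : a ≠ c := fun e => (List.nodup_cons.mp hn).1 (e ▸ h)
      rw [List.map_cons, List.map_cons, List.sum_cons, List.sum_cons,
        hg a List.mem_cons_self ha,
        ih (List.nodup_cons.mp hn).2 h (fun k hk hkc => hg k (List.mem_cons_of_mem _ hk) hkc)]
      ring

lemma pv_step (d : PySem.Dict String (List Int)) (seen : PySem.Dict String Int)
    (total base : Int) (i : Int) (c : String) (h : pvInv d seen total base) :
    pvInv (d.insert c (d.getD c [] ++ [i])) (seen.insert c i)
      (if seen.contains c then total - (i - seen.getD c 0) else total) base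
    ∧ pvSumLen (d.insert c (d.getD c [] ++ [i])) = pvSumLen d + 1 := by
  obtain ⟨hk, hnd, hlast, htot⟩ := h
  by_cases hc : d.contains c = true
  · -- c already seen
    have hcmem : c ∈ d.keys := (PySem.Dict.contains_iff_mem_keys d c).mp hc
    have hcs : seen.contains c = true := (PySem.Dict.contains_iff_mem_keys seen c).mpr (hk ▸ hcmem)
    have hkA : (d.insert c (d.getD c [] ++ [i])).keys = d.keys :=
      PySem.Dict.keys_insert_of_contains d _ hc
    have hne : d.getD c [] ≠ [] := by
      intro e
      have h1 := hlast c
      rw [e] at h1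
      rw [PySem.Dict.contains_eq_isSome_get?, ← h1] at hcs
      simp at hcs
    refine ⟨⟨?_, ?_, ?_, ?_⟩, ?_⟩
    · rw [PySem.Dict.keys_insert_of_contains seen _ hcs, hkA, hk]
    · rw [hkA]; exact hnd
    · intro k
      by_cases hkc : k = c
      · subst hkc
        rw [PySem.Dict.getD_insert_self, List.getLast?_concat, PySem.Dict.get?_insert_self]
      · rw [PySem.Dict.getD_insert_of_ne _ _ _ hkc, PySem.Dict.get?_insert_of_ne _ _ hkc]
        exact hlast k
    · simp only [hcs, if_true]
      rw [htot]
      have hS : pvSpan (d.insert c (d.getD c [] ++ [i])) (seen.insert c i)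
          = pvSpan d seen + (i - seen.getD c 0) := by
        unfold pvSpan
        rw [hkA,
          pv_sum_map_update hnd hcmem
            (fun k => seen.getD k 0 - (d.getD k []).head?.getD 0)
            (fun k => (seen.insert c i).getD k 0
              - ((d.insert c (d.getD c [] ++ [i])).getD k []).head?.getD 0)
            (fun k _ hkc => by
              simp [PySem.Dict.getD_insert_of_ne _ _ _ hkc])]
        simp only [PySem.Dict.getD_insert_self, List.head?_append]
        cases he : (d.getD c []).head? with
        | none => exact absurd (List.head?_eq_none_iff.mp he) hne
        | some v => simp
      rw [hS]; ring
    · unfold pvSumLen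
      rw [hkA,
        pv_sum_map_update hnd hcmem
          (fun k => ((d.getD k []).length : Int))
          (fun k => (((d.insert c (d.getD c [] ++ [i])).getD k []).length : Int))
          (fun k _ hkc => by simp [PySem.Dict.getD_insert_of_ne _ _ _ hkc])]
      simp only [PySem.Dict.getD_insert_self, List.length_append, List.length_cons, List.length_nil]
      push_cast
      ring
  · -- first occurrence of c
    have hc' : d.contains c = false := by simpa using hc
    have hcnm : c ∉ d.keys := fun m => hc ((PySem.Dict.contains_iff_mem_keys d c).mpr m)
    have hcs : seen.contains c = false := by
      rw [Bool.eq_false_iff]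
      intro hcs
      exact hcnm (hk ▸ (PySem.Dict.contains_iff_mem_keys seen c).mp hcs)
    have hdc : d.getD c [] = [] := PySem.Dict.getD_of_not_contains d [] hc'
    have hkA : (d.insert c (d.getD c [] ++ [i])).keys = d.keys ++ [c] :=
      PySem.Dict.keys_insert_of_not_contains d _ hc'
    refine ⟨⟨?_, ?_, ?_, ?_⟩, ?_⟩
    · rw [PySem.Dict.keys_insert_of_not_contains seen i hcs, hkA, hk]
    · rw [hkA]
      have := PySem.Dict.nodup_keys_insert d c (d.getD c [] ++ [i]) hnd
      rwa [hkA] at this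
    · intro k
      by_cases hkc : k = c
      · subst hkc
        rw [PySem.Dict.getD_insert_self, hdc, PySem.Dict.get?_insert_self]
        simp
      · rw [PySem.Dict.getD_insert_of_ne _ _ _ hkc, PySem.Dict.get?_insert_of_ne _ _ hkc]
        exact hlast k
    · simp only [hcs, if_false, Bool.false_eq_true]
      rw [htot]
      have hS : pvSpan (d.insert c (d.getD c [] ++ [i])) (seen.insert c i) = pvSpan d seen := by
        unfold pvSpan
        rw [hkA, List.map_append, List.sum_append]
        have hmap : d.keys.map (fun k => (seen.insert c i).getD k 0
              - ((d.insert c (d.getD c [] ++ [i])).getD k []).head?.getD 0)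
            = d.keys.map (fun k => seen.getD k 0 - (d.getD k []).head?.getD 0) :=
          List.map_congr_left (fun k hkm => by
            have hkc : k ≠ c := fun e => hcnm (e ▸ hkm)
            simp [PySem.Dict.getD_insert_of_ne _ _ _ hkc])
        rw [hmap]
        simp [hdc]
      rw [hS]
    · unfold pvSumLen
      rw [hkA, List.map_append, List.sum_append]
      have hmap : d.keys.map (fun k => (((d.insert c (d.getD c [] ++ [i])).getD k []).length : Int))
          = d.keys.map (fun k => ((d.getD k []).length : Int)) :=
        List.map_congr_left (fun k hkm => by
          have hkc : k ≠ c := fun e => hcnm (e ▸ hkm)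
          simp [PySem.Dict.getD_insert_of_ne _ _ _ hkc])
      rw [hmap]
      simp [hdc]

lemma pv_fold (xs : List (Int × String)) :
    ∀ (d : PySem.Dict String (List Int)) (seen : PySem.Dict String Int) (total base : Int),
    pvInv d seen total base →
    pvInv (xs.foldl (fun d p => d.insert p.2 (d.getD p.2 [] ++ [p.1])) d)
      ((xs.foldl (fun st p => (st.1.insert p.2 p.1,
          if st.1.contains p.2 then st.2 - (p.1 - st.1.getD p.2 0) else st.2)) (seen, total)).1)
      ((xs.foldl (fun st p => (st.1.insert p.2 p.1,
          if st.1.contains p.2 then st.2 - (p.1 - st.1.getD p.2 0) else st.2)) (seen, total)).2)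
      base
    ∧ pvSumLen (xs.foldl (fun d p => d.insert p.2 (d.getD p.2 [] ++ [p.1])) d)
        = pvSumLen d + xs.length := by
  induction xs with
  | nil => intro d seen total base h; exact ⟨h, by simp⟩
  | cons p t ih =>
    intro d seen total base h
    obtain ⟨h1, h2⟩ := pv_step d seen total base p.1 p.2 h
    simp only [List.foldl_cons]
    obtain ⟨ih1, ih2⟩ := ih _ _ _ _ h1
    refine ⟨ih1, ?_⟩
    rw [ih2, h2]
    simp only [List.length_cons]
    push_cast
    ring

lemma pvAdict_eq (cols : List String) :
    (PySem.List.pyRange 0 (PySem.List.len cols)).foldl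
      (fun d i =>
        d.insert (PySem.List.pyGetD cols i "") ((d.getD (PySem.List.pyGetD cols i "") []) ++ [i]))
      (PySem.Dict.empty : PySem.Dict String (List Int))
    = (PySem.List.enumerate cols).foldl
        (fun d p => d.insert p.2 (d.getD p.2 [] ++ [p.1])) PySem.Dict.empty := by
  rw [PySem.List.enumerate_eq_map_pyRange cols "", List.foldl_map]

lemma pv_pyGetD_neg_one (l : List Int) (d : Int) (h : l ≠ []) :
    PySem.List.pyGetD l (-1) d = l.getLast?.getD d := by
  simp only [PySem.List.pyGetD, PySem.List.pyGet?, PySem.List.pyIdx?, Int.reduceNeg, Int.neg_nonneg,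
    Int.reduceLE, ↓reduceIte, neg_le_neg_iff, Nat.one_le_cast, neg_neg, Int.toNat_one]
  have hl : 1 ≤ l.length := List.length_pos_iff.mpr h
  simp [hl, List.getLast?_eq_getElem?, List.getElem?_eq_getElem (by omega : l.length - 1 < l.length)]

lemma pv_pyGetD_zero (l : List Int) (d : Int) (h : l ≠ []) :
    PySem.List.pyGetD l 0 d = l.head?.getD d := by
  rw [PySem.List.pyGetD_of_nonneg _ _ (by omega)]
  cases l with
  | nil => exact absurd rfl h
  | cons a t => simp

lemma pv_sum_map_sub (xs : List String) (a b : String → Int) :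
    (xs.map (fun k => a k - b k)).sum = (xs.map a).sum - (xs.map b).sum := by
  induction xs with
  | nil => simp
  | cons x t ih => simp [ih]; ring

-- ===== VERDICT (by name: the statement is the Claim_ definition above) =====
theorem color_pattern_time_spec : Claim_equal_color_pattern_time := by
  intro cols _
  simp only [Spec_color_pattern_time, color_pattern_time, color_pattern_time_alt]
  rw [pvAdict_eq]
  have hinv0 : pvInv PySem.Dict.empty PySem.Dict.empty
      (3 * (cols.length : Int) - 1) (3 * (cols.length : Int) - 1) := by
    refine ⟨rfl, List.nodup_nil, fun k => ?_, ?_⟩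
    · simp [PySem.Dict.getD_empty, PySem.Dict.get?_empty]
    · simp [pvSpan, PySem.Dict.keys_empty]
  obtain ⟨⟨hk, hnd, hlast, htot⟩, hsum⟩ :=
    pv_fold (PySem.List.enumerate cols) _ _ _ _ hinv0
  set d := (PySem.List.enumerate cols).foldl
      (fun d p => d.insert p.2 (d.getD p.2 [] ++ [p.1])) PySem.Dict.empty with hd
  set st := (PySem.List.enumerate cols).foldl
      (fun st p => (st.1.insert p.2 p.1,
        if st.1.contains p.2 then st.2 - (p.1 - st.1.getD p.2 0) else st.2))
      ((PySem.Dict.empty : PySem.Dict String Int), 3 * (cols.length : Int) - 1) with hst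
  -- every stored list is nonempty on keys; rewrite A's per-key term through the invariant
  have hbody : ∀ (acc : Int), ∀ k ∈ d.keys,
      acc + ((d.getD k []).length : Int)
        - (PySem.List.pyGetD (d.getD k []) (-1) 0 - PySem.List.pyGetD (d.getD k []) 0 0)
      = acc + (((d.getD k []).length : Int)
          - (st.1.getD k 0 - (d.getD k []).head?.getD 0)) := by
    intro acc k hkm
    have hcs : st.1.contains k = true := (PySem.Dict.contains_iff_mem_keys _ k).mpr (hk ▸ hkm)
    have hne : d.getD k [] ≠ [] := by
      intro e
      have h1 := hlast k
      rw [e] at h1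
      rw [PySem.Dict.contains_eq_isSome_get?, ← h1] at hcs
      simp at hcs
    rw [pv_pyGetD_neg_one _ _ hne, pv_pyGetD_zero _ _ hne, hlast k,
      ← PySem.Dict.getD_eq_get?_getD]
    ring
  rw [PySem.List.foldl_congr_mem _ _ _ _ hbody, PySem.List.foldl_add,
    pv_sum_map_sub d.keys (fun k => ((d.getD k []).length : Int))
      (fun k => st.1.getD k 0 - (d.getD k []).head?.getD 0)]
  have hS : pvSumLen d = (cols.length : Int) := by
    rw [hsum]
    simp [pvSumLen, PySem.Dict.keys_empty, PySem.List.length_enumerate]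
  unfold pvSumLen at hS
  rw [hS]
  have hspan : (d.keys.map (fun k => st.1.getD k 0 - (d.getD k []).head?.getD 0)).sum
      = pvSpan d st.1 := rfl
  rw [hspan]
  omega
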